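-- pv_equiv track=rewrite | github.com/million-t/competitive-programming | 2410-maximum-matching-of-players-with-trainers/2410-maximum-matching-of-players-with-trainers.py | matchPlayersAndTrainers
-- ===== SOURCE A (Python) =====
-- from typing import List
--
-- def matchPlayersAndTrainers(players: List[int], trainers: List[int]) -> int:
--
--     trainers.sort()
--     players.sort()
--
--     t_size = len(trainers)
--     t_ptr = 0
--
--     count = 0
--     for p_ptr in range(len(players)):
--         while t_ptr < t_size and trainers[t_ptr] < players[p_ptr]:
--             t_ptr += 1
--
--         if t_ptr < t_size:
--             count += 1
--             t_ptr += 1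
--
--     return count
-- ===== SOURCE B (Python) =====
-- def matchPlayersAndTrainers(players, trainers):
--     players.sort()
--     trainers.sort()
--     m = len(trainers)
--
--     def feasible(k):
--         # the k smallest players each fit under the k largest trainers, pairwise
--         return all(players[i] <= trainers[m - k + i] for i in range(k))
--
--     lo, hi = 0, min(len(players), m)
--     while lo < hi:
--         mid = (lo + hi + 1) // 2
--         if feasible(mid):
--             lo = mid
--         else:
--             hi = mid - 1
--     return lo
-- ===== Notes on version B (the rewrite author's own statement) =====
-- stated objective: alternative
-- what changed: B computes the answer as the largest k for which the k smallest players pairwise fit under the k largest trainers, found by binary search on k, instead of A's two-pointer greedy scan over the sorted lists.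
import Mathlib
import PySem

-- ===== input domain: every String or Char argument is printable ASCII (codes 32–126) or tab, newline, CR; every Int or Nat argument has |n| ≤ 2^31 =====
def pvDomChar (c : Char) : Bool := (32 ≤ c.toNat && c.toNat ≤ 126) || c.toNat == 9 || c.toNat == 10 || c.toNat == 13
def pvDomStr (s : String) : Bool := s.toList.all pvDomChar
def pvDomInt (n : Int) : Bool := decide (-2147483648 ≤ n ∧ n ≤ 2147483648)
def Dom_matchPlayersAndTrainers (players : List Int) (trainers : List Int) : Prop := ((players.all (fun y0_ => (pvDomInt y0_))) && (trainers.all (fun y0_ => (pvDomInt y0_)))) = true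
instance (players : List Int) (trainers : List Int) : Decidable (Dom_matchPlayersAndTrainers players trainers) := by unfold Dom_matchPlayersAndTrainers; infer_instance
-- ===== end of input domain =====

-- ===== PORT A =====
-- B replaces A's two-pointer greedy by a binary search for the largest feasible matching size (alternative algorithm, same cost).
-- Both A and B sort both argument lists IN PLACE (an observable mutation); the equivalence proved is about the return value.
-- inner 'while t_ptr < t_size and trainers[t_ptr] < players[p_ptr]: t_ptr += 1'
def skipA (ts : List Int) (p : Int) (tptr : Nat) : Nat :=
  if h : tptr < ts.length ∧ ts[tptr]! < p then skipA ts p (tptr + 1) else tptr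
termination_by ts.length - tptr
decreasing_by omega

def matchPlayersAndTrainers (players : List Int) (trainers : List Int) : Int :=
  let ts := PySem.List.sorted trainers (fun x => x) false
  let ps := PySem.List.sorted players (fun x => x) false
  let tsize := ts.length
  -- for p_ptr in range(len(players)):  state = (t_ptr, count)
  let st := (List.range ps.length).foldl
    (fun (s : Nat × Int) pptr =>
      let tptr := skipA ts ps[pptr]! s.1
      if tptr < tsize then (tptr + 1, s.2 + 1) else (tptr, s.2))
    (0, 0)
  st.2

-- ===== PORT B =====
-- feasible(k): all(players[i] <= trainers[m - k + i] for i in range(k)); called only with k ≤ min of the lengths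
def feasB (ps ts : List Int) (k : Nat) : Bool :=
  (List.range k).all (fun i => decide (ps[i]! ≤ ts[ts.length - k + i]!))

-- the while-loop of B: binary search for the largest feasible k in [lo, hi]
def bsearchB (ps ts : List Int) (lo hi : Nat) : Nat :=
  if h : lo < hi then
    let mid := (lo + hi + 1) / 2
    if feasB ps ts mid then bsearchB ps ts mid hi else bsearchB ps ts lo (mid - 1)
  else lo
termination_by hi - lo
decreasing_by all_goals omega

def matchPlayersAndTrainers_alt (players : List Int) (trainers : List Int) : Int :=
  let ps := PySem.List.sorted players (fun x => x) false
  let ts := PySem.List.sorted trainers (fun x => x) false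
  (bsearchB ps ts 0 (min ps.length ts.length) : Int)

-- ===== PRECONDITION & SPEC =====
def Spec_matchPlayersAndTrainers (players : List Int) (trainers : List Int) (out : Int) : Prop := out = matchPlayersAndTrainers_alt players trainers
instance (players : List Int) (trainers : List Int) (out : Int) : Decidable (Spec_matchPlayersAndTrainers players trainers out) := by unfold Spec_matchPlayersAndTrainers; infer_instance

-- ===== CLAIM (what is proved, stated in full; the proofs are below) =====
def Claim_equal_matchPlayersAndTrainers : Prop := ∀ (players : List Int) (trainers : List Int), Dom_matchPlayersAndTrainers players trainers → Spec_matchPlayersAndTrainers players trainers (matchPlayersAndTrainers players trainers)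

-- ===== LEMMAS AND PROOFS =====
-- the greedy matching size, Nat-valued, for reasoning about A's loop
def mcN : List Int → List Int → Nat
  | _, [] => 0
  | [], _ :: _ => 0
  | p :: ps, t :: ts => if p ≤ t then 1 + mcN ps ts else mcN (p :: ps) ts

theorem mcN_nil (ts : List Int) : mcN [] ts = 0 := by cases ts <;> rfl

theorem mcN_nil' (ps : List Int) : mcN ps [] = 0 := by cases ps <;> rfl

theorem mcN_le (ps ts : List Int) : mcN ps ts ≤ ps.length ∧ mcN ps ts ≤ ts.length := by
  induction ts generalizing ps with
  | nil => simp [mcN_nil']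
  | cons t ts ih =>
    cases ps with
    | nil => simp [mcN_nil]
    | cons p ps =>
      rw [mcN]
      by_cases h : p ≤ t
      · rw [if_pos h]
        obtain ⟨h1, h2⟩ := ih ps
        simp only [List.length_cons]
        omega
      · rw [if_neg h]
        obtain ⟨h1, h2⟩ := ih (p :: ps)
        simp only [List.length_cons] at *
        omega

theorem skipA_ge (ts : List Int) (p : Int) (tptr : Nat) (h : ts.length ≤ tptr) :
    skipA ts p tptr = tptr := by
  unfold skipA
  rw [dif_neg]
  omega

theorem skipA_lemma (p : Int) (ps : List Int) (ts : List Int) (tptr : Nat) :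
    mcN (p :: ps) (ts.drop tptr) =
      if skipA ts p tptr < ts.length then 1 + mcN ps (ts.drop (skipA ts p tptr + 1)) else 0 := by
  by_cases hlt : tptr < ts.length
  · rw [List.drop_eq_getElem_cons hlt]
    have hget : ts[tptr]! = ts[tptr] := getElem!_pos ts tptr hlt
    by_cases hc : ts[tptr]! < p
    · have hskip : skipA ts p tptr = skipA ts p (tptr + 1) := by
        rw [skipA, dif_pos ⟨hlt, hc⟩]
      have hnle : ¬ p ≤ ts[tptr] := by rw [← hget]; omega
      rw [mcN, if_neg hnle, hskip]
      exact skipA_lemma p ps ts (tptr + 1)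
    · have hskip : skipA ts p tptr = tptr := by
        rw [skipA, dif_neg]
        intro h; exact hc h.2
      have hle : p ≤ ts[tptr] := by rw [← hget]; omega
      rw [mcN, if_pos hle, hskip, if_pos hlt]
  · rw [skipA_ge ts p tptr (by omega), if_neg hlt,
      List.drop_eq_nil_of_le (by omega)]
    exact mcN_nil' _
termination_by ts.length - tptr
decreasing_by omega

-- A's outer loop, as a fold over the player VALUES, computes the greedy matching size of the remaining trainers
theorem A_loop (ts : List Int) (ps : List Int) (tptr : Nat) (count : Int) :
    (ps.foldl
      (fun (s : Nat × Int) p =>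
        let t := skipA ts p s.1
        if t < ts.length then (t + 1, s.2 + 1) else (t, s.2))
      (tptr, count)).2 = count + (mcN ps (ts.drop tptr) : Int) := by
  induction ps generalizing tptr count with
  | nil => simp [mcN_nil]
  | cons p ps ih =>
    simp only [List.foldl_cons]
    have hk := skipA_lemma p ps ts tptr
    by_cases h : skipA ts p tptr < ts.length
    · rw [if_pos h] at hk
      simp only [h, if_true]
      rw [ih, hk]; push_cast; ring
    · rw [if_neg h] at hk
      simp only [h, if_false]
      rw [ih]
      have hnil : ts.drop (skipA ts p tptr) = [] := List.drop_eq_nil_of_le (by omega)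
      rw [hnil, mcN_nil', hk]

-- 'for p_ptr in range(len(players))' reads only ps[p_ptr]: it is a fold over ps itself
theorem foldl_range_getElem! {σ : Type} (l : List Int) (f : σ → Int → σ) (init : σ) :
    (List.range l.length).foldl (fun s i => f s l[i]!) init = l.foldl f init := by
  induction l generalizing init with
  | nil => simp
  | cons a l ih =>
    rw [List.length_cons, List.range_succ_eq_map, List.foldl_cons, List.foldl_map]
    simp only [Nat.succ_eq_add_one, List.getElem!_cons_succ, List.getElem!_cons_zero]
    exact ih (f init a)

-- feasibility as a Prop
theorem feasB_iff (ps ts : List Int) (k : Nat) :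
    feasB ps ts k = true ↔ ∀ i < k, ps[i]! ≤ ts[ts.length - k + i]! := by
  simp [feasB, List.all_eq_true]

-- monotone index access in a sorted list
theorem sorted_get!_mono (ts : List Int) (hs : ts.Pairwise (· ≤ ·)) (i j : Nat)
    (hij : i ≤ j) (hj : j < ts.length) : ts[i]! ≤ ts[j]! := by
  rw [getElem!_pos ts i (by omega), getElem!_pos ts j hj]
  rcases Nat.eq_or_lt_of_le hij with rfl | h
  · exact le_refl _
  · exact (List.pairwise_iff_getElem.mp hs) i j (by omega) hj h

-- the greedy size is itself feasible (needs trainers sorted)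
theorem greedy_feas (ts : List Int) (hs : ts.Pairwise (· ≤ ·)) (ps : List Int) :
    ∀ i < mcN ps ts, ps[i]! ≤ ts[ts.length - mcN ps ts + i]! := by
  induction ts generalizing ps with
  | nil => intro i hi; rw [mcN_nil'] at hi; omega
  | cons t ts ih =>
    cases ps with
    | nil => intro i hi; rw [mcN_nil] at hi; omega
    | cons p ps =>
      have hs' : ts.Pairwise (· ≤ ·) := hs.tail
      have hhead : ∀ x ∈ ts, t ≤ x := fun x hx => (List.pairwise_cons.mp hs).1 x hx
      rw [mcN]
      by_cases h : p ≤ t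
      · rw [if_pos h]
        intro i hi
        have hle := mcN_le ps ts
        have hlen : (t :: ts).length = ts.length + 1 := by simp
        cases i with
        | zero =>
          -- ps[0]! = p ≤ element at index (ts.length + 1) - (mcN+1)
          have hidx : (t :: ts).length - (1 + mcN ps ts) + 0 = ts.length - mcN ps ts := by
            simp; omega
          rw [hidx]
          simp only [List.getElem!_cons_zero]
          have : (t :: ts)[0]! ≤ (t :: ts)[ts.length - mcN ps ts]! :=
            sorted_get!_mono (t :: ts) hs 0 (ts.length - mcN ps ts) (by omega) (by simp only [List.length_cons]; omega)
          simp only [List.getElem!_cons_zero] at this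
          exact le_trans h this
        | succ i =>
          have hi' : i < mcN ps ts := by omega
          have hidx : (t :: ts).length - (1 + mcN ps ts) + (i + 1) =
              (ts.length - mcN ps ts + i) + 1 := by simp only [List.length_cons]; omega
          rw [hidx]
          simp only [List.getElem!_cons_succ]
          exact ih hs' ps i hi'
      · rw [if_neg h]
        intro i hi
        have hle := mcN_le (p :: ps) ts
        have hidx : (t :: ts).length - mcN (p :: ps) ts + i =
            (ts.length - mcN (p :: ps) ts + i) + 1 := by simp only [List.length_cons]; omega
        rw [hidx]
        simp only [List.getElem!_cons_succ]
        exact ih hs' (p :: ps) i hi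

-- any feasible k is at most the greedy size
theorem feas_le_greedy (ts : List Int) (ps : List Int) (k : Nat)
    (hkp : k ≤ ps.length) (hkt : k ≤ ts.length)
    (hf : ∀ i < k, ps[i]! ≤ ts[ts.length - k + i]!) : k ≤ mcN ps ts := by
  induction ts generalizing ps k with
  | nil => simp at hkt; omega
  | cons t ts ih =>
    cases ps with
    | nil => simp at hkp; omega
    | cons p ps =>
      rcases Nat.eq_zero_or_pos k with rfl | hk
      · omega
      rw [mcN]
      by_cases h : p ≤ t
      · rw [if_pos h]
        have hrec : k - 1 ≤ mcN ps ts := by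
          apply ih ps (k - 1) (by simp only [List.length_cons] at hkp; omega) (by simp only [List.length_cons] at hkt; omega)
          intro i hi
          have := hf (i + 1) (by omega)
          have hidx : (t :: ts).length - k + (i + 1) = (ts.length - (k - 1) + i) + 1 := by
            simp at hkt ⊢; omega
          rw [hidx] at this
          simpa using this
        omega
      · rw [if_neg h]
        have hkt' : k ≤ ts.length := by
          by_contra hc
          have hkeq : k = ts.length + 1 := by simp only [List.length_cons] at hkt; omega
          have := hf 0 (by omega)
          rw [hkeq] at this
          simp at this
          omega
        apply ih (p :: ps) k hkp hkt'
        intro i hi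
        have := hf i hi
        have hidx : (t :: ts).length - k + i = (ts.length - k + i) + 1 := by simp only [List.length_cons]; omega
        rw [hidx] at this
        simpa using this

-- feasibility is downward closed (needs trainers sorted)
theorem feas_down (ps ts : List Int) (hs : ts.Pairwise (· ≤ ·)) (j k : Nat)
    (hjk : j ≤ k) (hk : k ≤ ts.length)
    (hf : feasB ps ts k = true) : feasB ps ts j = true := by
  rw [feasB_iff] at hf ⊢
  intro i hi
  have h1 := hf i (by omega)
  calc ps[i]! ≤ ts[ts.length - k + i]! := h1
    _ ≤ ts[ts.length - j + i]! := sorted_get!_mono ts hs _ _ (by omega) (by omega)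

-- correctness of the binary-search loop: it returns the largest feasible k in [lo, H]
theorem bsearchB_spec (ps ts : List Int) (hs : ts.Pairwise (· ≤ ·)) (H : Nat)
    (hH : H ≤ ts.length) :
    ∀ n lo hi, hi - lo ≤ n → lo ≤ hi → hi ≤ H → feasB ps ts lo = true →
    (∀ k, hi < k → k ≤ H → feasB ps ts k = false) →
    (feasB ps ts (bsearchB ps ts lo hi) = true ∧
      lo ≤ bsearchB ps ts lo hi ∧ bsearchB ps ts lo hi ≤ hi ∧
      ∀ k, bsearchB ps ts lo hi < k → k ≤ H → feasB ps ts k = false) := by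
  intro n
  induction n with
  | zero =>
    intro lo hi hn hle hhi hlo hup
    have : lo = hi := by omega
    subst this
    rw [bsearchB, dif_neg (by omega)]
    exact ⟨hlo, le_refl _, le_refl _, hup⟩
  | succ n ih =>
    intro lo hi hn hle hhi hlo hup
    by_cases hlt : lo < hi
    · rw [bsearchB, dif_pos hlt]
      simp only
      set mid := (lo + hi + 1) / 2 with hmid
      have hm1 : lo < mid := by omega
      have hm2 : mid ≤ hi := by omega
      by_cases hfm : feasB ps ts mid
      · rw [if_pos hfm]
        exact And.imp_right (And.imp_left (fun h => le_trans (le_of_lt hm1) h))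
          (ih mid hi (by omega) hm2 hhi hfm hup)
      · rw [if_neg hfm]
        have hup' : ∀ k, mid - 1 < k → k ≤ H → feasB ps ts k = false := by
          intro k hk1 hk2
          by_cases hkhi : hi < k
          · exact hup k hkhi hk2
          · -- mid ≤ k ≤ hi: if feasB k then feasB mid, contradiction
            by_contra hc
            rw [Bool.not_eq_false] at hc
            exact hfm (feas_down ps ts hs mid k (by omega) (by omega) hc)
        have := ih lo (mid - 1) (by omega) (by omega) (by omega) hlo hup'
        exact ⟨this.1, this.2.1, by omega, this.2.2.2⟩
    · rw [bsearchB, dif_neg hlt]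
      exact ⟨hlo, le_refl _, hle, fun k h1 h2 => hup k (by omega) h2⟩

theorem feasB_zero (ps ts : List Int) : feasB ps ts 0 = true := by
  simp [feasB]

-- ===== VERDICT (by name: the statement is the Claim_ definition above) =====
theorem matchPlayersAndTrainers_spec : Claim_equal_matchPlayersAndTrainers := by
  intro players trainers _
  show matchPlayersAndTrainers players trainers = matchPlayersAndTrainers_alt players trainers
  unfold matchPlayersAndTrainers matchPlayersAndTrainers_alt
  simp only
  set ps := PySem.List.sorted players (fun x => x) false with hps
  set ts := PySem.List.sorted trainers (fun x => x) false with hts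
  have hsorted : ts.Pairwise (· ≤ ·) := by
    rw [hts]
    exact PySem.List.sorted_pairwise trainers (fun x => x)
  -- A's side computes the greedy size
  have hA : ((List.range ps.length).foldl
      (fun (s : Nat × Int) pptr =>
        let tptr := skipA ts ps[pptr]! s.1
        if tptr < ts.length then (tptr + 1, s.2 + 1) else (tptr, s.2))
      (0, 0)).2 = (mcN ps ts : Int) := by
    rw [foldl_range_getElem! ps
      (fun (s : Nat × Int) p =>
        let t := skipA ts p s.1
        if t < ts.length then (t + 1, s.2 + 1) else (t, s.2)) (0, 0)]
    rw [A_loop ts ps 0 0, List.drop_zero]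
    ring
  rw [hA]
  -- B's side: the binary search finds exactly the greedy size
  set H := min ps.length ts.length with hH
  have hle := mcN_le ps ts
  have hspec := bsearchB_spec ps ts hsorted H (by omega) H 0 H (by omega) (by omega) (by omega)
    (feasB_zero ps ts) (fun k h1 h2 => absurd h2 (by omega))
  set r := bsearchB ps ts 0 H with hr
  have hfc : feasB ps ts (mcN ps ts) = true := by
    rw [feasB_iff]
    exact greedy_feas ts hsorted ps
  have hcr : mcN ps ts ≤ r := by
    by_contra hc
    have := hspec.2.2.2 (mcN ps ts) (by omega) (by omega)
    rw [hfc] at this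
    exact absurd this (by simp)
  have hrc : r ≤ mcN ps ts := by
    apply feas_le_greedy ts ps r (by omega) (by omega)
    rw [← feasB_iff]
    exact hspec.1
  have : r = mcN ps ts := by omega
  rw [this]
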